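-- pv_equiv track=rewrite | github.com/peter-hunt/python-project-euler-solution | src/17.py | initial_solve
-- ===== SOURCE A (Python) =====
-- ones_and_teens = [
--     0,  # zero isn't spoken
--     3,  # one
--     3,  # two
--     5,  # three
--     4,  # four
--     4,  # five
--     3,  # six
--     5,  # seven
--     5,  # eight
--     4,  # nine
--     3,  # ten
--     6,  # eleven
--     6,  # twelve
--     8,  # thirteen
--     8,  # fourteen
--     7,  # fifteen
--     7,  # sixteen
--     9,  # seventeen
--     8,  # eighteen
--     8,  # nineteen
-- ]
--
-- tens = [
--     0,  # zero isn't spoken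
--     0,  # ten is used in teens
--     6,  # twenty
--     6,  # thirty
--     5,  # forty
--     5,  # fifty
--     5,  # sixty
--     7,  # seventy
--     6,  # eighty
--     6,  # ninety
-- ]
--
-- def initial_solve(limit):
--     def count_letter(num):
--         if num < 20:
--             return ones_and_teens[num]
--         elif num == 1000:
--             return 11
--
--         if num % 1000 >= 100:
--             hundred = ones_and_teens[num % 1000 // 100] + 7
--             if num % 100 != 0:
--                 hundred += 3
--         else:
--             hundred = 0
--
--         if num % 100 < 20:
--             return hundred + ones_and_teens[num % 100]
--         else:
--             ten = tens[num % 100 // 10]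
--             one = ones_and_teens[num % 10]
--             return hundred + ten + one
--     return sum(count_letter(num) for num in range(1, limit + 1))
-- ===== SOURCE B (Python) =====
-- _ONES = [0, 3, 3, 5, 4, 4, 3, 5, 5, 4, 3, 6, 6, 8, 8, 7, 7, 9, 8, 8]
-- _TENS = [0, 0, 6, 6, 5, 5, 5, 7, 6, 6]
--
-- def _letters(m):
--     # letters used for a number 0..999 spoken with British 'and'
--     h, r = divmod(m, 100)
--     below = _ONES[r] if r < 20 else _TENS[r // 10] + _ONES[r % 10]
--     if h == 0:
--         return below
--     return _ONES[h] + 7 + (3 if r != 0 else 0) + below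
--
-- _PERIOD = sum(_letters(m) for m in range(1000))
--
-- def initial_solve(limit):
--     if limit < 1:
--         return 0
--     q, r = divmod(limit, 1000)
--     total = q * _PERIOD + sum(_letters(m) for m in range(1, r + 1))
--     if limit >= 1000:
--         total += 11  # 'one thousand' itself
--     return total
-- ===== Notes on version B (the rewrite author's own statement) =====
-- stated objective: faster
-- what changed: B replaces A's per-number summation over range(1, limit+1) by a closed form: quotient*(precomputed letter-sum of one 1000-period) + a partial sum over limit % 1000, plus 11 for 'one thousand' when limit >= 1000.
import Mathlib
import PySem

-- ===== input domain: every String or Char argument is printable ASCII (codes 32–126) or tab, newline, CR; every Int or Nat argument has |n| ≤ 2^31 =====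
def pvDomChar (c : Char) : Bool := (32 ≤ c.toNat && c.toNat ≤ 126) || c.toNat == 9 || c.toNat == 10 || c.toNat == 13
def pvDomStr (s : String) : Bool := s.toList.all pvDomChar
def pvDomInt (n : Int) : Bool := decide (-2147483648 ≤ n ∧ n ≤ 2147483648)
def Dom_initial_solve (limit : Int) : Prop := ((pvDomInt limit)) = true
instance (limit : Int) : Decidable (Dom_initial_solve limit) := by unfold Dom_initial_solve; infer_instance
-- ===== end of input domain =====

-- B replaces A's O(limit) per-number summation by one closed form: quotient × (precomputed
-- letter-sum of one 1000-period) + a partial sum over limit % 1000 (+11 for 'one thousand').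

-- ===== PORT A =====
def pvOnes : List Int := [0, 3, 3, 5, 4, 4, 3, 5, 5, 4, 3, 6, 6, 8, 8, 7, 7, 9, 8, 8]
def pvTens : List Int := [0, 0, 6, 6, 5, 5, 5, 7, 6, 6]

-- inner helper count_letter; indices produced by A are always in range, so pyGetD 0 is exact here
def pvCl (num : Int) : Int :=
  if num < 20 then PySem.List.pyGetD pvOnes num 0
  else if num = 1000 then 11
  else
    let hundred : Int :=
      if 100 ≤ PySem.Int.mod num 1000 then
        let h := PySem.List.pyGetD pvOnes (PySem.Int.floordiv (PySem.Int.mod num 1000) 100) 0 + 7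
        if PySem.Int.mod num 100 ≠ 0 then h + 3 else h
      else 0
    if PySem.Int.mod num 100 < 20 then
      hundred + PySem.List.pyGetD pvOnes (PySem.Int.mod num 100) 0
    else
      hundred + PySem.List.pyGetD pvTens (PySem.Int.floordiv (PySem.Int.mod num 100) 10) 0
              + PySem.List.pyGetD pvOnes (PySem.Int.mod num 10) 0

def initial_solve (limit : Int) : Int :=
  (PySem.List.pyRange 1 (limit + 1) 1).foldl (fun acc num => acc + pvCl num) 0

-- ===== PORT B =====
-- _letters m : letters of a number 0..999
def pvLetters (m : Int) : Int :=
  let h := PySem.Int.floordiv m 100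
  let r := PySem.Int.mod m 100
  let below : Int :=
    if r < 20 then PySem.List.pyGetD pvOnes r 0
    else PySem.List.pyGetD pvTens (PySem.Int.floordiv r 10) 0
         + PySem.List.pyGetD pvOnes (PySem.Int.mod r 10) 0
  if h = 0 then below
  else PySem.List.pyGetD pvOnes h 0 + 7 + (if r ≠ 0 then 3 else 0) + below

def pvPeriod : Int :=
  (PySem.List.pyRange 0 1000 1).foldl (fun acc m => acc + pvLetters m) 0

def initial_solve_alt (limit : Int) : Int :=
  if limit < 1 then 0
  else
    let q := PySem.Int.floordiv limit 1000
    let r := PySem.Int.mod limit 1000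
    let total := q * pvPeriod
        + (PySem.List.pyRange 1 (r + 1) 1).foldl (fun acc m => acc + pvLetters m) 0
    if 1000 ≤ limit then total + 11 else total

-- ===== PRECONDITION & SPEC =====
def Spec_initial_solve (limit : Int) (out : Int) : Prop := out = initial_solve_alt limit
instance (limit : Int) (out : Int) : Decidable (Spec_initial_solve limit out) := by unfold Spec_initial_solve; infer_instance

-- ===== CLAIM (what is proved, stated in full; the proofs are below) =====
def Claim_equal_initial_solve : Prop := ∀ (limit : Int), Dom_initial_solve limit → Spec_initial_solve limit (initial_solve limit)

-- ===== LEMMAS AND PROOFS =====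

-- partial sums of pvLetters over 1..r
def pvPsum (r : Nat) : Int :=
  (PySem.List.pyRange 1 ((r : Int) + 1) 1).foldl (fun acc m => acc + pvLetters m) 0

-- A's running sum up to k
def pvFsum (k : Nat) : Int :=
  (PySem.List.pyRange 1 ((k : Int) + 1) 1).foldl (fun acc num => acc + pvCl num) 0

-- closed form B computes for a nonnegative limit k
def pvBval (k : Nat) : Int :=
  ((k / 1000 : Nat) : Int) * pvPeriod + pvPsum (k % 1000) + (if 1000 ≤ k then 11 else 0)

-- pvCl and pvLetters agree on one period (finite check)
set_option maxRecDepth 100000 in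
lemma pvTable (a : Nat) (h : a < 1000) : pvCl (a : Int) = pvLetters (a : Int) := by
  revert a h
  decide

-- pvCl factors through num % 1000 away from 1000
lemma pvCl_mod (n : Int) (h1 : 1 ≤ n) (h2 : n ≠ 1000) :
    pvCl n = pvLetters (PySem.Int.mod n 1000) := by
  have e1000 : PySem.Int.mod n 1000 = n % 1000 := PySem.Int.mod_eq_emod_of_pos (by omega)
  have hm0 : 0 ≤ n % 1000 := Int.emod_nonneg n (by omega)
  have hm1 : n % 1000 < 1000 := Int.emod_lt_of_pos n (by omega)
  have tbl : pvCl (n % 1000) = pvLetters (n % 1000) := by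
    have := pvTable (n % 1000).toNat (by omega)
    rwa [Int.toNat_of_nonneg hm0] at this
  rw [e1000, ← tbl]
  by_cases h20 : n < 20
  · rw [Int.emod_eq_of_lt (by omega) (by omega)]
  · have e100 : PySem.Int.mod n 100 = n % 100 := PySem.Int.mod_eq_emod_of_pos (by omega)
    have e10 : PySem.Int.mod n 10 = n % 10 := PySem.Int.mod_eq_emod_of_pos (by omega)
    have em1000 : PySem.Int.mod (n % 1000) 1000 = n % 1000 := by
      rw [PySem.Int.mod_eq_emod_of_pos (by omega)]
      exact Int.emod_eq_of_lt hm0 hm1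
    have em100 : PySem.Int.mod (n % 1000) 100 = n % 100 := by
      rw [PySem.Int.mod_eq_emod_of_pos (by omega)]
      exact Int.emod_emod_of_dvd n (by norm_num)
    have em10 : PySem.Int.mod (n % 1000) 10 = n % 10 := by
      rw [PySem.Int.mod_eq_emod_of_pos (by omega)]
      exact Int.emod_emod_of_dvd n (by norm_num)
    by_cases hm20 : n % 1000 < 20
    · have h100 : n % 100 = n % 1000 := by
        rw [← Int.emod_emod_of_dvd n (by norm_num : (100:Int) ∣ 1000)]
        exact Int.emod_eq_of_lt hm0 (by omega)
      simp only [pvCl, e1000, e100, e10, h100, if_neg h20, if_neg h2,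
        if_neg (by omega : ¬ (100:Int) ≤ n % 1000), if_pos (by omega : n % 1000 < 20), zero_add]
    · simp only [pvCl, e1000, e100, e10, em1000, em100, em10, if_neg h20, if_neg h2,
        if_neg hm20, if_neg (by omega : ¬ n % 1000 = 1000)]

lemma pvPeriod_eq : pvPeriod = pvPsum 999 := by
  have h0 : pvLetters 0 = 0 := by decide
  unfold pvPeriod pvPsum
  rw [PySem.List.pyRange_one_cons (by norm_num)]
  norm_num [List.foldl_cons, h0]

lemma pvPsum_zero : pvPsum 0 = 0 := by
  unfold pvPsum
  rw [show ((0:Nat):Int) + 1 = 1 by norm_num, PySem.List.pyRange_one_eq_nil (by norm_num)]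
  rfl

lemma pvPsum_succ (r : Nat) : pvPsum (r + 1) = pvPsum r + pvLetters ((r : Int) + 1) := by
  unfold pvPsum
  push_cast
  rw [show ((r:Int) + 1 + 1) = ((r:Int) + 1) + 1 by ring,
    PySem.List.pyRange_one_succ_right (by omega), List.foldl_append]
  simp [List.foldl_cons]

lemma pvFsum_eq (k : Nat) : pvFsum k = pvBval k := by
  induction k with
  | zero =>
    unfold pvFsum pvBval
    rw [show ((0:Nat):Int) + 1 = 1 by norm_num, PySem.List.pyRange_one_eq_nil (by norm_num)]
    simp [pvPsum_zero]
  | succ k ih =>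
    have hstep : pvFsum (k + 1) = pvFsum k + pvCl ((k : Int) + 1) := by
      unfold pvFsum
      push_cast
      rw [show ((k:Int) + 1 + 1) = ((k:Int) + 1) + 1 by ring,
        PySem.List.pyRange_one_succ_right (by omega), List.foldl_append]
      simp [List.foldl_cons]
    rw [hstep, ih]
    by_cases ha : k + 1 = 1000
    · have hk : k = 999 := by omega
      subst hk
      have h11 : pvCl (((999:Nat) : Int) + 1) = 11 := by norm_num [pvCl]
      rw [h11]
      unfold pvBval
      norm_num [pvPeriod_eq, pvPsum_zero]
    · have hcl : pvCl ((k : Int) + 1) = pvLetters (((k + 1) % 1000 : Nat) : Int) := by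
        have := pvCl_mod ((k : Int) + 1) (by omega) (by exact_mod_cast fun h => ha (by exact_mod_cast h))
        rw [this, PySem.Int.mod_eq_emod_of_pos (by norm_num),
          show ((k:Int) + 1) % 1000 = (((k + 1) % 1000 : Nat) : Int) by omega]
      rw [hcl]
      by_cases hb : (k + 1) % 1000 = 0
      · -- n is a multiple of 1000, n ≠ 1000 so n ≥ 2000
        have hk2 : k + 1 ≥ 2000 := by omega
        have hL0 : pvLetters (((k+1) % 1000 : Nat) : Int) = 0 := by
          rw [hb]; decide
        unfold pvBval
        rw [hL0, hb]
        have h999 : k % 1000 = 999 := by omega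
        have hq : (k + 1) / 1000 = k / 1000 + 1 := by omega
        rw [h999, hq, if_pos (by omega : 1000 ≤ k + 1), if_pos (by omega : 1000 ≤ k),
          ← pvPeriod_eq, pvPsum_zero]
        push_cast
        ring
      · have hr : (k + 1) % 1000 = k % 1000 + 1 := by omega
        have hq : (k + 1) / 1000 = k / 1000 := by omega
        unfold pvBval
        rw [hr, hq, pvPsum_succ]
        have hind : (if 1000 ≤ k + 1 then (11:Int) else 0) = (if 1000 ≤ k then 11 else 0) := by
          have : ¬ (k + 1 = 1000) := ha
          by_cases h : 1000 ≤ k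
          · rw [if_pos (by omega), if_pos h]
          · rw [if_neg (by omega), if_neg h]
        rw [hind]
        push_cast
        ring

lemma pvAlt_eq (k : Nat) (h : 1 ≤ k) : initial_solve_alt (k : Int) = pvBval k := by
  have e1 : PySem.Int.floordiv (k : Int) 1000 = ((k / 1000 : Nat) : Int) := by
    rw [PySem.Int.floordiv_eq_ediv_of_pos (by norm_num)]; omega
  have e2 : PySem.Int.mod (k : Int) 1000 = ((k % 1000 : Nat) : Int) := by
    rw [PySem.Int.mod_eq_emod_of_pos (by norm_num)]; omega
  simp only [initial_solve_alt, pvBval, pvPsum, e1, e2,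
    if_neg (show ¬ ((k:Int) < 1) by omega)]
  by_cases h1000 : 1000 ≤ k
  · rw [if_pos (show (1000:Int) ≤ (k:Int) by omega), if_pos h1000]
  · rw [if_neg (show ¬ ((1000:Int) ≤ (k:Int)) by omega), if_neg h1000]
    ring

-- ===== VERDICT (by name: the statement is the Claim_ definition above) =====
theorem initial_solve_spec : Claim_equal_initial_solve := by
  intro limit _
  unfold Spec_initial_solve
  by_cases hlt : limit < 1
  · unfold initial_solve initial_solve_alt
    rw [PySem.List.pyRange_one_eq_nil (by omega)]
    simp [hlt]
  · push Not at hlt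
    obtain ⟨k, rfl⟩ : ∃ k : Nat, limit = (k : Int) :=
      ⟨limit.toNat, by omega⟩
    have hk : 1 ≤ k := by exact_mod_cast hlt
    have : initial_solve (k : Int) = pvFsum k := rfl
    rw [this, pvFsum_eq, pvAlt_eq k hk]
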